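-- pv_equiv track=rewrite | github.com/JiahuaLiY/CR_and_CNN_algorithm | src/algorithm.py | buildShortcutPath
-- ===== SOURCE A (Python) =====
-- def buildShortcutPath(
--                       Pcr,
--                       P,
--                       unvisitedVertices,
--                       vertexToIndex):
--     """Build the shortcut path Pm through unvisited vertices following
--     the initial order of the tour P."""
--     start = Pcr[-1]
--     Pm = [start]
--     startIndex = vertexToIndex[start]
--     index = (startIndex + 1) % len(P)
--     while index != startIndex:
--         v = P[index]
--         if v in unvisitedVertices:
--             Pm.append(v)
--         index = (index + 1) % len(P)
--     return Pm
-- ===== SOURCE B (Python) =====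
-- def buildShortcutPath(
--                       Pcr,
--                       P,
--                       unvisitedVertices,
--                       vertexToIndex):
--     """Build the shortcut path Pm through unvisited vertices following
--     the initial order of the tour P.
--
--     Rank-and-sort formulation: every position i != startIndex of P gets the
--     rotated rank (i - startIndex) % len(P) (its distance after the start in
--     cyclic tour order); the unvisited vertices are collected once and sorted
--     by that rank, which reproduces exactly the order of the cyclic scan."""
--     start = Pcr[-1]
--     startIndex = vertexToIndex[start]
--     n = len(P)
--     unvisited = set(unvisitedVertices)
--     pairs = [((i - startIndex) % n, v)
--              for i, v in enumerate(P)
--              if i != startIndex and v in unvisited]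
--     pairs.sort(key=lambda p: p[0])
--     return [start] + [v for _, v in pairs]
-- ===== Notes on version B (the rewrite author's own statement) =====
-- stated objective: alternative
-- what changed: Replaces A's cyclic modular while-scan (with a linear membership test per step) by a rank-and-sort formulation: collect each non-start position with its rotated rank (i - startIndex) % n, filtering by a set built once, then sort by rank.
import Mathlib
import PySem

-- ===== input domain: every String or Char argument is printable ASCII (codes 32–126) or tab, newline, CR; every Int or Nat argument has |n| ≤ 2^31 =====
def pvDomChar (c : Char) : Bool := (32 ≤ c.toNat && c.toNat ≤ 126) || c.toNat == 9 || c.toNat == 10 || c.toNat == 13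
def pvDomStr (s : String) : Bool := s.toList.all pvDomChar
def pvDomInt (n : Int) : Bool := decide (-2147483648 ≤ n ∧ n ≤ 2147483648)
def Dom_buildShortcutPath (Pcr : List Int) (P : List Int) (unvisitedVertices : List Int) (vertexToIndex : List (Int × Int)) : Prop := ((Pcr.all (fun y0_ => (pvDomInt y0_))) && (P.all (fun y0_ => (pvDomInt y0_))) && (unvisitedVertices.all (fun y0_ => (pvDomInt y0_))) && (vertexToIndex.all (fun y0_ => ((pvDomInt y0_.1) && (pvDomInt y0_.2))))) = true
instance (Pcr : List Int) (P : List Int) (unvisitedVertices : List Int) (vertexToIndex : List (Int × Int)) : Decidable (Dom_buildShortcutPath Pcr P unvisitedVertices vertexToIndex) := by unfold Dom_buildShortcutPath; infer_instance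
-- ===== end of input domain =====

-- B replaces A's cyclic modular while-scan by a rank-and-sort formulation: each non-start
-- position gets rotated rank (i - startIndex) % n, the unvisited ones (set membership) are
-- collected in one pass and sorted by rank (objective: alternative).

-- ===== PORT A =====
-- the while loop; fuel is a totality guard only (the loop runs at most len(P)-1 steps when
-- 0 ≤ startIndex < len(P); outside that Python diverges, excluded by Pre_)
def buildShortcutPathLoopA (P unvisitedVertices : List Int) (startIndex : Int) :
    Nat → Int → List Int → List Int
  | 0, _, Pm => Pm
  | fuel + 1, index, Pm =>
    if index = startIndex then Pm
    else
      let Pm' :=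
        match PySem.List.pyGet? P index with   -- v = P[index]
        | some v => if unvisitedVertices.contains v then Pm ++ [v] else Pm
        | none => Pm                           -- IndexError: unreachable under Pre_
      buildShortcutPathLoopA P unvisitedVertices startIndex fuel
        (PySem.Int.mod (index + 1) P.length) Pm'

def buildShortcutPath (Pcr : List Int) (P : List Int) (unvisitedVertices : List Int) (vertexToIndex : List (Int × Int)) : List Int :=
  match PySem.List.pyGet? Pcr (-1) with        -- start = Pcr[-1]
  | none => []                                 -- IndexError: excluded by Pre_
  | some start =>
    match PySem.Dict.get? ⟨vertexToIndex⟩ start with  -- startIndex = vertexToIndex[start]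
    | none => []                               -- KeyError: excluded by Pre_
    | some startIndex =>
      buildShortcutPathLoopA P unvisitedVertices startIndex P.length
        (PySem.Int.mod (startIndex + 1) P.length) [start]

-- ===== PORT B =====
def buildShortcutPath_alt (Pcr : List Int) (P : List Int) (unvisitedVertices : List Int) (vertexToIndex : List (Int × Int)) : List Int :=
  match PySem.List.pyGet? Pcr (-1) with        -- start = Pcr[-1]
  | none => []
  | some start =>
    match PySem.Dict.get? ⟨vertexToIndex⟩ start with  -- startIndex = vertexToIndex[start]
    | none => []
    | some startIndex =>
      let n : Int := P.length
      let unvisited : PySem.Set Int := PySem.Set.ofList unvisitedVertices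
      let pairs :=
        ((PySem.List.enumerate P).filter
            (fun p => p.1 != startIndex && PySem.Set.contains unvisited p.2)).map
          (fun p => (PySem.Int.mod (p.1 - startIndex) n, p.2))
      let sortedPairs := PySem.List.sorted pairs (fun p => p.1)
      start :: sortedPairs.map (fun p => p.2)

-- ===== PRECONDITION & SPEC =====
-- Pre_ excludes exactly the inputs where A raises (IndexError on empty Pcr, KeyError on a start
-- absent from vertexToIndex, ZeroDivisionError on empty P) or diverges (startIndex outside [0, len(P))).
def Pre_buildShortcutPath (Pcr : List Int) (P : List Int) (unvisitedVertices : List Int) (vertexToIndex : List (Int × Int)) : Prop :=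
  Pcr ≠ [] ∧
  (PySem.Dict.get? ⟨vertexToIndex⟩ ((PySem.List.pyGet? Pcr (-1)).getD 0)).isSome = true ∧
  0 ≤ (PySem.Dict.get? ⟨vertexToIndex⟩ ((PySem.List.pyGet? Pcr (-1)).getD 0)).getD 0 ∧
  (PySem.Dict.get? ⟨vertexToIndex⟩ ((PySem.List.pyGet? Pcr (-1)).getD 0)).getD 0 < (P.length : Int)
instance (Pcr : List Int) (P : List Int) (unvisitedVertices : List Int) (vertexToIndex : List (Int × Int)) : Decidable (Pre_buildShortcutPath Pcr P unvisitedVertices vertexToIndex) := by unfold Pre_buildShortcutPath; infer_instance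

def pvWitness_buildShortcutPath : List Int × List Int × List Int × (List (Int × Int)) :=
  ([7, 3], [5, 3, 8, 2], [8, 5, 9], [(5, 0), (3, 1), (8, 2), (2, 3)])

def Spec_buildShortcutPath (Pcr : List Int) (P : List Int) (unvisitedVertices : List Int) (vertexToIndex : List (Int × Int)) (out : List Int) : Prop := out = buildShortcutPath_alt Pcr P unvisitedVertices vertexToIndex
instance (Pcr : List Int) (P : List Int) (unvisitedVertices : List Int) (vertexToIndex : List (Int × Int)) (out : List Int) : Decidable (Spec_buildShortcutPath Pcr P unvisitedVertices vertexToIndex out) := by unfold Spec_buildShortcutPath; infer_instance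

-- ===== CLAIM (what is proved, stated in full; the proofs are below) =====
def Claim_equal_buildShortcutPath : Prop := ∀ (Pcr : List Int) (P : List Int) (unvisitedVertices : List Int) (vertexToIndex : List (Int × Int)), Dom_buildShortcutPath Pcr P unvisitedVertices vertexToIndex → Pre_buildShortcutPath Pcr P unvisitedVertices vertexToIndex → Spec_buildShortcutPath Pcr P unvisitedVertices vertexToIndex (buildShortcutPath Pcr P unvisitedVertices vertexToIndex)

-- ===== LEMMAS AND PROOFS =====

-- A-side: the segment of indices i, i+1, …, s-1 (cyclically) that A's loop still has to visit
def cycSeg (P : List Int) (s i : Nat) : List Int :=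
  if i ≤ s then (P.drop i).take (s - i) else P.drop i ++ P.take s

lemma cycSeg_cons (P : List Int) (s i : Nat) (hs : s < P.length) (hi : i < P.length) (hne : i ≠ s) :
    cycSeg P s i = P[i] :: cycSeg P s ((i + 1) % P.length) := by
  unfold cycSeg
  rcases Nat.lt_or_ge i s with h | h
  · have h1 : (i + 1) % P.length = i + 1 := Nat.mod_eq_of_lt (by omega)
    rw [h1]
    simp only [if_pos (by omega : i ≤ s), if_pos (by omega : i + 1 ≤ s)]
    rw [List.drop_eq_getElem_cons hi, show s - i = (s - (i+1)) + 1 by omega,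
      List.take_succ_cons]
  · have h' : s < i := by omega
    rcases Nat.lt_or_ge (i+1) P.length with h2 | h2
    · have h1 : (i + 1) % P.length = i + 1 := Nat.mod_eq_of_lt h2
      rw [h1]
      simp only [if_neg (by omega : ¬ i ≤ s), if_neg (by omega : ¬ i + 1 ≤ s)]
      rw [List.drop_eq_getElem_cons hi, List.cons_append]
    · have hlast : i = P.length - 1 := by omega
      have h1 : (i + 1) % P.length = 0 := by
        have : i + 1 = P.length := by omega
        simp [this]
      rw [h1]
      simp only [if_neg (by omega : ¬ i ≤ s), if_pos (by omega : 0 ≤ s)]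
      have hd : P.drop i = [P[i]] := by
        rw [List.drop_eq_getElem_cons hi]
        have : P.drop (i+1) = [] := by simp [List.drop_eq_nil_iff]; omega
        simp [this]
      simp [hd]

lemma loopA_eq (P unv : List Int) (s : Nat) (hs : s < P.length) :
    ∀ (fuel i : Nat) (Pm : List Int), i < P.length →
      (if i ≤ s then s - i else s + P.length - i) ≤ fuel →
      buildShortcutPathLoopA P unv (s : Int) fuel (i : Int) Pm
        = Pm ++ (cycSeg P s i).filter (fun v => unv.contains v) := by
  intro fuel
  induction fuel with
  | zero =>
    intro i Pm hi hle
    have : i = s := by split_ifs at hle <;> omega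
    subst this
    simp [buildShortcutPathLoopA, cycSeg]
  | succ fuel ih =>
    intro i Pm hi hle
    by_cases hie : i = s
    · subst hie
      simp [buildShortcutPathLoopA, cycSeg]
    · have hcast : ((i : Int)) ≠ (s : Int) := by exact_mod_cast hie
      rw [buildShortcutPathLoopA]
      simp only [if_neg hcast]
      have hget : PySem.List.pyGet? P (i : Int) = some P[i] := by
        simp [PySem.List.pyGet?_natCast, List.getElem?_eq_getElem hi]
      rw [hget]
      have hmod : PySem.Int.mod ((i : Int) + 1) (P.length : Int)
          = (((i + 1) % P.length : Nat) : Int) := by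
        push_cast
        exact_mod_cast PySem.Int.mod_natCast (i+1) P.length
      have hi' : (i + 1) % P.length < P.length := Nat.mod_lt _ (by omega)
      have hstep : (if (i + 1) % P.length ≤ s then s - (i + 1) % P.length
          else s + P.length - (i + 1) % P.length) ≤ fuel := by
        rcases Nat.lt_or_ge (i+1) P.length with h2 | h2
        · rw [Nat.mod_eq_of_lt h2]
          split_ifs at hle ⊢ <;> omega
        · have : (i+1) % P.length = 0 := by
            have : i + 1 = P.length := by omega
            simp [this]
          rw [this]
          split_ifs at hle ⊢ <;> omega
      have := ih ((i+1) % P.length) (match PySem.List.pyGet? P (i : Int) with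
        | some v => if unv.contains v then Pm ++ [v] else Pm
        | none => Pm) hi' hstep
      rw [hget] at this
      simp only at this ⊢
      rw [hmod, this, cycSeg_cons P s i hs hi hie]
      by_cases hv : P[i] ∈ unv
      · simp [hv, List.append_assoc]
      · simp [hv]

theorem loop_main (P unv : List Int) (s : Nat) (hs : s < P.length) (start : Int) :
    buildShortcutPathLoopA P unv (s : Int) P.length
        (PySem.Int.mod ((s : Int) + 1) P.length) [start]
      = start :: (P.drop (s + 1) ++ P.take s).filter (fun v => unv.contains v) := by
  have hmod : PySem.Int.mod ((s : Int) + 1) (P.length : Int)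
      = (((s + 1) % P.length : Nat) : Int) := by
    push_cast
    exact_mod_cast PySem.Int.mod_natCast (s+1) P.length
  have hi' : (s + 1) % P.length < P.length := Nat.mod_lt _ (by omega)
  have hseg : cycSeg P s ((s + 1) % P.length) = P.drop (s + 1) ++ P.take s := by
    rcases Nat.lt_or_ge (s+1) P.length with h2 | h2
    · rw [Nat.mod_eq_of_lt h2]
      unfold cycSeg
      rw [if_neg (by omega)]
    · have hn : s + 1 = P.length := by omega
      have h0 : (s + 1) % P.length = 0 := by simp [hn]
      rw [h0]
      unfold cycSeg
      rw [if_pos (by omega)]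
      have : P.drop (s+1) = [] := by simp [List.drop_eq_nil_iff]; omega
      simp [this]
  rw [hmod, loopA_eq P unv s hs P.length ((s+1) % P.length) [start] hi'
    (by split_ifs <;> omega), hseg]
  simp

-- B-side: the rotated rank, for 0 ≤ i < n, 0 ≤ t < n, i ≠ t
lemma rank_eq (i t n : Int) (hn : 0 < n) (hne : i ≠ t) (hi0 : 0 ≤ i) (hi : i < n) (ht0 : 0 ≤ t) (ht : t < n) :
    PySem.Int.mod (i - t) n = if t < i then i - t else i - t + n := by
  rw [PySem.Int.mod_eq_emod_of_pos hn]
  split_ifs with h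
  · exact Int.emod_eq_of_lt (by omega) (by omega)
  · calc (i - t) % n = (i - t + n * 1) % n := (Int.add_mul_emod_self_left (i - t) n 1).symm
      _ = i - t + n := by rw [mul_one]; exact Int.emod_eq_of_lt (by omega) (by omega)

-- B-side: sorting the non-start positions by rotated rank IS the rotation drop (t+1) ++ take t
lemma sorted_pairs_eq (P unv : List Int) (t : Nat) (ht : t < P.length) :
    PySem.List.sorted
      (((PySem.List.enumerate P).filter
          (fun p => p.1 != (t : Int) && unv.contains p.2)).map
        (fun p => (PySem.Int.mod (p.1 - (t : Int)) (P.length : Int), p.2)))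
      (fun p => p.1) false
    = ((PySem.List.enumerate (P.drop (t + 1)) ((t : Int) + 1)
         ++ PySem.List.enumerate (P.take t) 0).filter
        (fun p => unv.contains p.2)).map
      (fun p => (PySem.Int.mod (p.1 - (t : Int)) (P.length : Int), p.2)) := by
  have hmem1 : ∀ p ∈ PySem.List.enumerate (P.drop (t + 1)) ((t : Int) + 1),
      (t : Int) < p.1 ∧ p.1 < (P.length : Int) := by
    intro p hp
    rw [PySem.List.mem_enumerate_iff] at hp
    obtain ⟨k, hk, rfl⟩ := hp
    simp only [List.length_drop] at hk
    refine ⟨by omega, by push_cast; omega⟩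
  have hmem0 : ∀ p ∈ PySem.List.enumerate (P.take t) 0,
      0 ≤ p.1 ∧ p.1 < (t : Int) := by
    intro p hp
    rw [PySem.List.mem_enumerate_iff] at hp
    obtain ⟨k, hk, rfl⟩ := hp
    simp only [List.length_take] at hk
    refine ⟨by omega, by push_cast; omega⟩
  have hn : (0:Int) < (P.length : Int) := by omega
  have hP : P.take t ++ P[t] :: P.drop (t + 1) = P := by
    rw [← List.drop_eq_getElem_cons ht, List.take_append_drop]
  have hlt : (0 : Int) + ((P.take t).length : Int) = (t : Int) := by
    simp [List.length_take]; omega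
  have hfilter : (PySem.List.enumerate P).filter
        (fun p => p.1 != (t : Int) && unv.contains p.2)
      = (PySem.List.enumerate (P.take t) 0).filter (fun p => unv.contains p.2)
        ++ (PySem.List.enumerate (P.drop (t + 1)) ((t : Int) + 1)).filter
             (fun p => unv.contains p.2) := by
    conv_lhs => rw [← hP]
    rw [PySem.List.enumerate_append, PySem.List.enumerate_cons, hlt, List.filter_append,
      List.filter_cons]
    simp only [bne_self_eq_false, Bool.false_and, if_neg (Bool.false_ne_true)]
    congr 1
    · apply List.filter_congr
      intro p hp
      have h2 := (hmem0 p hp).2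
      have : (p.1 != (t:Int)) = true := by simp; omega
      rw [this, Bool.true_and]
    · apply List.filter_congr
      intro p hp
      have h2 := (hmem1 p hp).1
      have : (p.1 != (t:Int)) = true := by simp; omega
      rw [this, Bool.true_and]
  apply PySem.List.sorted_eq_of_perm_of_pairwise_lt
  · apply List.Perm.map
    rw [hfilter, List.filter_append]
    exact List.perm_append_comm
  · rw [List.pairwise_map]
    have hpw : (PySem.List.enumerate (P.drop (t + 1)) ((t : Int) + 1)
          ++ PySem.List.enumerate (P.take t) 0).Pairwise
        (fun p q : Int × Int => PySem.Int.mod (p.1 - (t:Int)) (P.length : Int)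
           < PySem.Int.mod (q.1 - (t:Int)) (P.length : Int)) := by
      rw [List.pairwise_append]
      refine ⟨?_, ?_, ?_⟩
      · apply List.Pairwise.imp_of_mem ?_ (PySem.List.pairwise_lt_enumerate _ _)
        intro a b ha hb hR
        obtain ⟨h1, h2⟩ := hmem1 a ha
        obtain ⟨h3, h4⟩ := hmem1 b hb
        rw [rank_eq _ _ _ hn (by omega) (by omega) h2 (by omega) (by omega),
            rank_eq _ _ _ hn (by omega) (by omega) h4 (by omega) (by omega)]
        simp only [if_pos h1, if_pos h3]
        omega
      · apply List.Pairwise.imp_of_mem ?_ (PySem.List.pairwise_lt_enumerate _ _)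
        intro a b ha hb hR
        obtain ⟨h1, h2⟩ := hmem0 a ha
        obtain ⟨h3, h4⟩ := hmem0 b hb
        rw [rank_eq _ _ _ hn (by omega) (by omega) (by omega) (by omega) (by omega),
            rank_eq _ _ _ hn (by omega) (by omega) (by omega) (by omega) (by omega)]
        simp only [if_neg (by omega : ¬ (t:Int) < a.1), if_neg (by omega : ¬ (t:Int) < b.1)]
        omega
      · intro a ha b hb
        obtain ⟨h1, h2⟩ := hmem1 a ha
        obtain ⟨h3, h4⟩ := hmem0 b hb
        rw [rank_eq _ _ _ hn (by omega) (by omega) h2 (by omega) (by omega),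
            rank_eq _ _ _ hn (by omega) h3 (by omega) (by omega) (by omega)]
        simp only [if_pos h1, if_neg (by omega : ¬ (t:Int) < b.1)]
        omega
    exact List.Pairwise.sublist List.filter_sublist hpw

-- ===== VERDICT (by name: the statement is the Claim_ definition above) =====
theorem buildShortcutPath_spec : Claim_equal_buildShortcutPath := by
  unfold Claim_equal_buildShortcutPath
  intro Pcr P unv vtx _ hpre
  obtain ⟨h1, h2, h3, h4⟩ := hpre
  unfold Spec_buildShortcutPath
  cases hst : PySem.List.pyGet? Pcr (-1) with
  | none =>
    rw [PySem.List.pyGet?_neg_one, List.getLast?_eq_none_iff] at hst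
    exact absurd hst h1
  | some start =>
    rw [hst] at h2 h3 h4
    simp only [Option.getD_some] at h2 h3 h4
    cases hd : PySem.Dict.get? ⟨vtx⟩ start with
    | none => rw [hd] at h2; simp at h2
    | some si =>
      rw [hd] at h3 h4
      simp only [Option.getD_some] at h3 h4
      simp only [buildShortcutPath, buildShortcutPath_alt, hst, hd]
      have hsi : si = ((si.toNat : Nat) : Int) := by omega
      have hs : si.toNat < P.length := by omega
      rw [hsi, loop_main P unv si.toNat hs start]
      have hset : (fun p : Int × Int => p.1 != ((si.toNat : Nat) : Int)
            && PySem.Set.contains (PySem.Set.ofList unv) p.2)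
          = fun p : Int × Int => p.1 != ((si.toNat : Nat) : Int) && unv.contains p.2 := by
        funext p
        rw [PySem.Set.contains_eq_listContains]
        simp [PySem.Set.mem_ofList]
      rw [hset, sorted_pairs_eq P unv si.toNat hs]
      congr 1
      rw [List.map_map]
      have hsnd : ((PySem.List.enumerate (P.drop (si.toNat + 1)) ((si.toNat : Int) + 1)
            ++ PySem.List.enumerate (P.take si.toNat) 0).map (fun p : Int × Int => p.2))
          = P.drop (si.toNat + 1) ++ P.take si.toNat := by
        rw [List.map_append, PySem.List.map_snd_enumerate, PySem.List.map_snd_enumerate]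
      conv_lhs => rw [← hsnd, List.filter_map]
      simp [Function.comp_def]
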